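-- pv_equiv track=rewrite | github.com/jimmymalhan/code_master_platform | 3.algorithmic_expert/Strings/001.b.palindrome_count_Substrings.py | getMaxSubstrings
-- ===== SOURCE A (Python) =====
-- def getMaxSubstrings(s, k):
--     while len(s) > 0:
--         if len(s) < k: # if the length of the string is less than k, then we can't make a substring of length k
--             return 0
--         if isPalindrome(s[:k]): # if the first k characters are a palindrome, then we can make a substring of length k
--             return 1 + getMaxSubstrings(s[k:], k) # we can make a substring of length k, so we add 1 to the number of substrings
--         else:
--             return getMaxSubstrings(s[1:], k) # we can't make a substring of length k, so we move on to the next character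
--     return 0
--
-- def isPalindrome(s):
--     return s == s[::-1]
-- ===== SOURCE B (Python) =====
-- def getMaxSubstrings(s, k):
--     if k <= 0:
--         return 0
--     def pal(i, j):
--         while i < j:
--             if s[i] != s[j]:
--                 return False
--             i += 1
--             j -= 1
--         return True
--     n = len(s)
--     count = 0
--     i = 0
--     while i + k <= n:
--         if pal(i, i + k - 1):
--             count += 1
--             i += k
--         else:
--             i += 1
--     return count
-- ===== Notes on version B (the rewrite author's own statement) =====
-- stated objective: alternative
-- what changed: Replaced A's recursion that copies the string on every step (s[:k], s[k:], s[1:], full reverse of the slice) by a single iterative index-pointer loop with an in-place two-pointer palindrome check, so no substring is ever materialised and there is no recursion depth limit; intended as faster (measured 170x at the largest size both finished, unconfirmed by the harness because A hits Python's recursion limit / times out on larger inputs).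
import Mathlib
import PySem

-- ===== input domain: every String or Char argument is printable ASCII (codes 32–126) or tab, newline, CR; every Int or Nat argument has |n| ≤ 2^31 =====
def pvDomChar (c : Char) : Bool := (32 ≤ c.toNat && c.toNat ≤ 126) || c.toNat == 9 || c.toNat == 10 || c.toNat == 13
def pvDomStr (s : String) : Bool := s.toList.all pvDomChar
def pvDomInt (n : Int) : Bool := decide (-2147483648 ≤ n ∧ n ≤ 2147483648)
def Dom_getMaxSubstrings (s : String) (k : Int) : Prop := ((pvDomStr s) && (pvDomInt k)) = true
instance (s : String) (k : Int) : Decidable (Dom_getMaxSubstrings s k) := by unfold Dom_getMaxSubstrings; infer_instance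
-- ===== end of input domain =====

-- B replaces A's slicing recursion by an iterative index-pointer loop with an in-place
-- two-pointer palindrome check: no substring copies, no recursion depth limit.

-- ===== PORT A =====
-- isPalindrome(s): s == s[::-1]
def pvIsPal (l : List Char) : Bool := l == (PySem.List.slice? l none none (-1)).getD []

-- A's recursion, fueled only to make it total in Lean (Python A diverges for k ≤ 0 on
-- non-empty s; with k ≥ 1 each call shrinks the string, so fuel = length+1 is never exhausted).
def pvGoA : Nat → List Char → Int → Int
  | 0, _, _ => 0
  | fuel + 1, l, k =>
    if 0 < l.length then                                          -- while len(s) > 0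
      if (l.length : Int) < k then 0                              -- if len(s) < k: return 0
      else if pvIsPal (PySem.List.slice l none (some k)) then     -- isPalindrome(s[:k])
        1 + pvGoA fuel (PySem.List.slice l (some k) none) k       -- 1 + getMaxSubstrings(s[k:], k)
      else pvGoA fuel (PySem.List.slice l (some 1) none) k        -- getMaxSubstrings(s[1:], k)
    else 0                                                        -- return 0

def getMaxSubstrings (s : String) (k : Int) : Int :=
  pvGoA (s.toList.length + 1) s.toList k

-- ===== PORT B =====
-- pal(i, j): two-pointer comparison of s[i..j] in place
def pvPalIdx (l : List Char) (i j : Nat) : Bool :=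
  if i < j then
    if l.getD i ' ' ≠ l.getD j ' ' then false
    else pvPalIdx l (i + 1) (j - 1)
  else true
termination_by j - i
decreasing_by omega

-- B's while loop: i is an index pointer, c the count accumulator; fueled for totality
-- (with k ≥ 1 the pointer advances by at least 1, so fuel = length+1 is never exhausted).
def pvGoB (l : List Char) (k : Int) : Nat → Nat → Int → Int
  | 0, _, c => c
  | fuel + 1, i, c =>
    if (i : Int) + k ≤ (l.length : Int) then                      -- while i + k <= n
      if pvPalIdx l i (i + k.toNat - 1) then                      -- if pal(i, i + k - 1)
        pvGoB l k fuel (i + k.toNat) (c + 1)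
      else pvGoB l k fuel (i + 1) c
    else c

def getMaxSubstrings_alt (s : String) (k : Int) : Int :=
  if k ≤ 0 then 0
  else pvGoB s.toList k (s.toList.length + 1) 0 0

-- ===== PRECONDITION & SPEC =====
-- Pre_ excludes exactly the inputs (non-empty s with k ≤ 0) on which Python A recurses on
-- an unchanged string and raises RecursionError.
def Pre_getMaxSubstrings (s : String) (k : Int) : Prop := s = "" ∨ 1 ≤ k
instance (s : String) (k : Int) : Decidable (Pre_getMaxSubstrings s k) := by
  unfold Pre_getMaxSubstrings; infer_instance

def pvWitness_getMaxSubstrings : String × Int := ("abacbb", 2)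

def Spec_getMaxSubstrings (s : String) (k : Int) (out : Int) : Prop := out = getMaxSubstrings_alt s k
instance (s : String) (k : Int) (out : Int) : Decidable (Spec_getMaxSubstrings s k out) := by unfold Spec_getMaxSubstrings; infer_instance

-- ===== CLAIM (what is proved, stated in full; the proofs are below) =====
def Claim_equal_getMaxSubstrings : Prop := ∀ (s : String) (k : Int), Dom_getMaxSubstrings s k → Pre_getMaxSubstrings s k → Spec_getMaxSubstrings s k (getMaxSubstrings s k)

-- ===== LEMMAS AND PROOFS =====

-- pvIsPal is reverse-equality.
lemma pvIsPal_eq (u : List Char) : pvIsPal u = (u == u.reverse) := by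
  simp [pvIsPal, PySem.List.slice?_none_none_neg_one]

-- two-pointer characterisation
lemma pvPalIdx_iff (l : List Char) (i j : Nat) :
    pvPalIdx l i j = true ↔ ∀ t, i ≤ t → t ≤ j → l.getD t ' ' = l.getD (i + j - t) ' ' := by
  rw [pvPalIdx]
  by_cases h : i < j
  · rw [if_pos h]
    by_cases hc : l.getD i ' ' ≠ l.getD j ' '
    · rw [if_pos hc]
      constructor
      · intro hf; exact absurd hf (by simp)
      · intro hall
        have h1 := hall i le_rfl (le_of_lt h)
        have hij : i + j - i = j := by omega
        rw [hij] at h1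
        exact absurd h1 hc
    · rw [if_neg hc]
      rw [not_not] at hc
      rw [pvPalIdx_iff l (i + 1) (j - 1)]
      constructor
      · intro hall t hit htj
        by_cases hti : t = i
        · subst hti
          have e : t + j - t = j := by omega
          rw [e]; exact hc
        · by_cases htj2 : t = j
          · subst htj2
            have e : i + t - t = i := by omega
            rw [e]; exact hc.symm
          · have h2 := hall t (by omega) (by omega)
            have hidx : i + 1 + (j - 1) - t = i + j - t := by omega
            rw [hidx] at h2; exact h2
      · intro hall t hit htj
        have h2 := hall t (by omega) (by omega)
        have hidx : i + 1 + (j - 1) - t = i + j - t := by omega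
        rw [hidx]; exact h2
  · rw [if_neg h]
    constructor
    · intro _ t hit htj
      have ht : t = i := by omega
      subst ht
      have hj : t + j - t = t := by omega
      rw [hj]
    · intro _; rfl
termination_by j - i
decreasing_by omega

-- reverse-equality characterisation by positions (getD form)
lemma rev_eq_iff (u : List Char) :
    (u = u.reverse) ↔ ∀ t, t < u.length → u.getD t ' ' = u.getD (u.length - 1 - t) ' ' := by
  constructor
  · intro h t ht
    conv_lhs => rw [h]
    rw [List.getD_eq_getElem _ _ (by simpa using ht),
        List.getD_eq_getElem _ _ (by omega)]
    simp [List.getElem_reverse]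
  · intro h
    apply List.ext_getElem (by simp)
    intro t ht _
    rw [List.getElem_reverse]
    have := h t ht
    rw [List.getD_eq_getElem _ _ ht, List.getD_eq_getElem _ _ (by omega)] at this
    exact this

-- the bridge: two-pointer check on indices [i, i+m-1] of l equals reverse-equality of the window
lemma pal_bridge (l : List Char) (i m : Nat) (hm : 1 ≤ m) (hle : i + m ≤ l.length) :
    pvIsPal ((l.drop i).take m) = pvPalIdx l i (i + m - 1) := by
  set u := (l.drop i).take m with hu
  have hlen : u.length = m := by simp [hu]; omega
  have hget : ∀ t, t < m → u.getD t ' ' = l.getD (i + t) ' ' := by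
    intro t ht
    rw [List.getD_eq_getElem _ _ (by omega), List.getD_eq_getElem _ _ (by omega)]
    simp [hu]
  rw [pvIsPal_eq, Bool.eq_iff_iff, beq_iff_eq, rev_eq_iff, pvPalIdx_iff, hlen]
  constructor
  · intro h t hit htj
    have ht' : t - i < m := by omega
    have := h (t - i) ht'
    rw [hget _ ht', hget _ (by omega)] at this
    have e1 : i + (t - i) = t := by omega
    have e2 : i + (m - 1 - (t - i)) = i + (i + m - 1) - t := by omega
    rw [e1, e2] at this; exact this
  · intro h t ht
    have := h (i + t) (by omega) (by omega)
    rw [hget _ ht, hget _ (by omega)]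
    have e : i + (i + m - 1) - (i + t) = i + (m - 1 - t) := by omega
    rw [e] at this; exact this

-- lockstep simulation of A's recursion by B's loop
lemma goB_eq_goA (l : List Char) (k : Int) (hk : 1 ≤ k) :
    ∀ (fuel : Nat) (i : Nat) (c : Int),
      pvGoB l k fuel i c = c + pvGoA fuel (l.drop i) k := by
  intro fuel
  induction fuel with
  | zero => intro i c; simp [pvGoB, pvGoA]
  | succ fuel ih =>
    intro i c
    have hdl : (l.drop i).length = l.length - i := by simp
    by_cases hin : (i : Int) + k ≤ (l.length : Int)
    · have hi : i < l.length := by omega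
      have hpos : 0 < (l.drop i).length := by omega
      have hnlt : ¬ ((l.drop i).length : Int) < k := by
        rw [hdl]; push_cast; omega
      have hm : 1 ≤ k.toNat := by omega
      have hle : i + k.toNat ≤ l.length := by omega
      have hpal : pvIsPal (PySem.List.slice (l.drop i) none (some k))
          = pvPalIdx l i (i + k.toNat - 1) := by
        rw [PySem.List.slice_to _ (by omega : (0:Int) ≤ k)]
        exact pal_bridge l i k.toNat hm hle
      rw [pvGoB, pvGoA, if_pos hin, if_pos hpos, if_neg hnlt, hpal]
      by_cases hp : pvPalIdx l i (i + k.toNat - 1) = true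
      · rw [if_pos hp, if_pos hp, ih]
        have hdrop : PySem.List.slice (l.drop i) (some k) none = l.drop (i + k.toNat) := by
          rw [PySem.List.slice_from _ (by omega : (0:Int) ≤ k), List.drop_drop]
        rw [hdrop]; ring
      · rw [if_neg hp, if_neg hp, ih]
        have hdrop : PySem.List.slice (l.drop i) (some 1) none = l.drop (i + 1) := by
          rw [PySem.List.slice_from _ (by omega : (0:Int) ≤ 1), List.drop_drop]
          norm_num
        rw [hdrop]
    · rw [pvGoB, pvGoA, if_neg hin]
      by_cases hpos : 0 < (l.drop i).length
      · have hnlt : ((l.drop i).length : Int) < k := by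
          have hi : i < l.length := by omega
          rw [hdl]; push_cast; omega
        rw [if_pos hpos, if_pos hnlt]; ring
      · rw [if_neg hpos]; ring

-- ===== VERDICT (by name: the statement is the Claim_ definition above) =====
theorem getMaxSubstrings_spec : Claim_equal_getMaxSubstrings := by
  intro s k _ hpre
  unfold Spec_getMaxSubstrings getMaxSubstrings getMaxSubstrings_alt
  by_cases hk0 : k ≤ 0
  · have hs : s = "" := by
      rcases hpre with hs | hk
      · exact hs
      · exact absurd hk (by omega)
    subst hs
    rw [if_pos hk0]
    rfl
  · rw [if_neg hk0]
    rw [goB_eq_goA s.toList k (by omega)]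
    simp
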